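-- pv_equiv track=rewrite | github.com/jbussdieker/bussdcc-system-health | src/bussdcc_system/service/device_manager/graph.py | expand_dirty_ids
-- ===== SOURCE A (Python) =====
-- from typing import Any, Mapping
--
-- def expand_dirty_ids(
--     dirty: set[str],
--     dependents: Mapping[str, set[str]],
-- ) -> set[str]:
--     expanded = set(dirty)
--     stack = list(dirty)
--
--     while stack:
--         node_id = stack.pop()
--
--         for child in dependents.get(node_id, set()):
--             if child in expanded:
--                 continue
--             expanded.add(child)
--             stack.append(child)
--
--     return expanded
-- ===== SOURCE B (Python) =====
-- def expand_dirty_ids(dirty, dependents):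
--     # Level-synchronous (BFS) frontier expansion instead of a single-node stack loop.
--     expanded = set(dirty)
--     frontier = set(dirty)
--     while frontier:
--         nxt = set()
--         for node in frontier:
--             nxt |= dependents.get(node, set())
--         nxt -= expanded
--         expanded |= nxt
--         frontier = nxt
--     return expanded
-- ===== Notes on version B (the rewrite author's own statement) =====
-- stated objective: alternative
-- what changed: Replaced the single-node stack pop loop (DFS-style worklist with a per-child membership check and push) by level-synchronous BFS: each round unions all dependents of the whole frontier into one set, subtracts the already-expanded set, and that difference becomes both the new additions and the next frontier.
import Mathlib
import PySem

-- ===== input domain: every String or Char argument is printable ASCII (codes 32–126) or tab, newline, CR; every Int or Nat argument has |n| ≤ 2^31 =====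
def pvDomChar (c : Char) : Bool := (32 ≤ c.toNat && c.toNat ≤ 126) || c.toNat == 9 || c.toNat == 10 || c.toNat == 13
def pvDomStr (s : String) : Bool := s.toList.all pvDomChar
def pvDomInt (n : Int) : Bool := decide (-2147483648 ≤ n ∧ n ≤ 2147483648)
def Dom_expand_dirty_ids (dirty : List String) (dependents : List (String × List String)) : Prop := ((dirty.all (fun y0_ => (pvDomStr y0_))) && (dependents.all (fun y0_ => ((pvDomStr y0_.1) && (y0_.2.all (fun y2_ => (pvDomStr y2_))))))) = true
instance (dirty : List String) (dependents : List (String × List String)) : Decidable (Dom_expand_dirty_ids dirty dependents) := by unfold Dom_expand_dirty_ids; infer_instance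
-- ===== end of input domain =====

-- B replaces A's one-node-at-a-time stack worklist by level-synchronous BFS frontier expansion
-- (alternative decomposition, same asymptotic cost). Python returns a SET; both ports return its
-- elements sorted, the canonical order-independent representation of that set (Python's own set
-- iteration order is hash order and not modelled).


-- ===== PORT A =====
-- dependents.get(node, set()) — first-match association-list lookup (PySem.Dict)
def pvChildren (dependents : List (String × List String)) (x : String) : List String :=
  PySem.Dict.getD ⟨dependents⟩ x []

-- the inner 'for child in dependents.get(node_id, set()):' body of A
def pvStepA (cs : List String) (p : PySem.Set String × List String) : PySem.Set String × List String :=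
  cs.foldl (fun q child =>
    if PySem.Set.contains q.1 child then q
    else (PySem.Set.add q.1 child, child :: q.2)) p

-- A's 'while stack:' loop; the stack is kept top-first (head = Python's stack[-1], so
-- 'stack.pop()' is taking the head and 'stack.append(c)' is consing); fuel only guards totality
def pvLoopA (dependents : List (String × List String)) :
    Nat → PySem.Set String → List String → PySem.Set String
  | 0, expanded, _ => expanded
  | _ + 1, expanded, [] => expanded
  | fuel + 1, expanded, node :: rest =>
      let p := pvStepA (pvChildren dependents node) (expanded, rest)
      pvLoopA dependents fuel p.1 p.2

def expand_dirty_ids (dirty : List String) (dependents : List (String × List String)) : List String :=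
  let expanded := PySem.Set.ofList dirty
  let stack := dirty.reverse
  let fuel := 2 * (dirty.length + (dependents.flatMap (fun p => p.2)).length) + dirty.length + 1
  PySem.List.sorted (pvLoopA dependents fuel expanded stack) (fun x => x)

-- ===== PORT B =====
-- B's 'while frontier:' loop: one level per iteration — union all dependents of the frontier,
-- subtract expanded, add the rest, recurse on it; fuel only guards totality
def pvLoopB (dependents : List (String × List String)) :
    Nat → PySem.Set String → PySem.Set String → PySem.Set String
  | 0, expanded, _ => expanded
  | _ + 1, expanded, [] => expanded
  | fuel + 1, expanded, frontier@(_ :: _) =>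
      let nxt0 := frontier.foldl
        (fun acc node => PySem.Set.union acc (pvChildren dependents node)) PySem.Set.empty
      let nxt := PySem.Set.diff nxt0 expanded
      pvLoopB dependents fuel (PySem.Set.union expanded nxt) nxt

def expand_dirty_ids_alt (dirty : List String) (dependents : List (String × List String)) : List String :=
  let expanded := PySem.Set.ofList dirty
  let fuel := dirty.length + (dependents.flatMap (fun p => p.2)).length + 2
  PySem.List.sorted (pvLoopB dependents fuel expanded expanded) (fun x => x)

-- ===== PRECONDITION & SPEC =====
def Spec_expand_dirty_ids (dirty : List String) (dependents : List (String × List String)) (out : List String) : Prop := out = expand_dirty_ids_alt dirty dependents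
instance (dirty : List String) (dependents : List (String × List String)) (out : List String) : Decidable (Spec_expand_dirty_ids dirty dependents out) := by unfold Spec_expand_dirty_ids; infer_instance

-- ===== CLAIM (what is proved, stated in full; the proofs are below) =====
def Claim_equal_expand_dirty_ids : Prop := ∀ (dirty : List String) (dependents : List (String × List String)), Dom_expand_dirty_ids dirty dependents → Spec_expand_dirty_ids dirty dependents (expand_dirty_ids dirty dependents)

-- ===== LEMMAS AND PROOFS =====

-- reachability from the dirty set through the dependents edges
inductive pvReach (dirty : List String) (dependents : List (String × List String)) : String → Prop
  | base {x : String} : x ∈ dirty → pvReach dirty dependents x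
  | step {x y : String} : pvReach dirty dependents x → y ∈ pvChildren dependents x →
      pvReach dirty dependents y

-- the universe every expanded node lives in
def pvU (dirty : List String) (dependents : List (String × List String)) : List String :=
  PySem.Set.ofList (dirty ++ dependents.flatMap (fun p => p.2))

-- number of universe elements not yet expanded (the loop measure)
def pvRem (U : List String) (e : PySem.Set String) : Nat :=
  (U.filter (fun u => !PySem.Set.contains e u)).length

theorem pvChildren_subset {dependents : List (String × List String)} {x y : String}
    (h : y ∈ pvChildren dependents x) : y ∈ dependents.flatMap (fun p => p.2) := by
  unfold pvChildren PySem.Dict.getD PySem.Dict.get? at h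
  cases hf : List.find? (fun p => p.1 == x) dependents with
  | none => rw [hf] at h; simp at h
  | some pr =>
      rw [hf] at h; simp at h
      exact List.mem_flatMap.2 ⟨pr, List.mem_of_find?_eq_some hf, h⟩

theorem pvChildren_mem_U {dirty : List String} {dependents : List (String × List String)}
    {x y : String} (h : y ∈ pvChildren dependents x) : y ∈ pvU dirty dependents := by
  unfold pvU
  exact (PySem.Set.mem_ofList _ _).2 (List.mem_append.2 (Or.inr (pvChildren_subset h)))

theorem pvContains_true {s : PySem.Set String} {x : String} (h : x ∈ s) :
    PySem.Set.contains s x = true := (PySem.Set.contains_iff s x).2 h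

theorem pvContains_false {s : PySem.Set String} {x : String} (h : x ∉ s) :
    PySem.Set.contains s x = false := by
  cases hc : PySem.Set.contains s x
  · rfl
  · exact absurd ((PySem.Set.contains_iff s x).1 hc) h

theorem pvFilterNotMem {e : PySem.Set String} {u : String} (h : u ∈ e) (U : List String) :
    List.filter (fun v => !PySem.Set.contains e v) (u :: U)
      = List.filter (fun v => !PySem.Set.contains e v) U :=
  List.filter_cons_of_neg (by simp [h])

theorem pvFilterMem {e : PySem.Set String} {u : String} (h : u ∉ e) (U : List String) :
    List.filter (fun v => !PySem.Set.contains e v) (u :: U)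
      = u :: List.filter (fun v => !PySem.Set.contains e v) U :=
  List.filter_cons_of_pos (by simp [h])

theorem pvRem_le (U : List String) (e : PySem.Set String) : pvRem U e ≤ U.length :=
  List.length_filter_le _ _

theorem pvRem_mono {U : List String} {e e' : PySem.Set String}
    (h : ∀ u, u ∈ e → u ∈ e') : pvRem U e' ≤ pvRem U e := by
  induction U with
  | nil => simp [pvRem]
  | cons u U ih =>
      unfold pvRem at *
      by_cases hu : u ∈ e'
      · rw [pvFilterNotMem hu]
        by_cases hue : u ∈ e
        · rw [pvFilterNotMem hue]; exact ih
        · rw [pvFilterMem hue, List.length_cons]; omega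
      · have hue : u ∉ e := fun hx => hu (h u hx)
        rw [pvFilterMem hu, pvFilterMem hue, List.length_cons, List.length_cons]; omega

theorem pvRem_add {U : List String} {e : PySem.Set String} {x : String}
    (hU : U.Nodup) (hx : x ∈ U) (hxe : x ∉ e) :
    pvRem U (PySem.Set.add e x) + 1 = pvRem U e := by
  induction U with
  | nil => cases hx
  | cons u U ih =>
      rcases List.nodup_cons.1 hU with ⟨hune, hnd⟩
      unfold pvRem at *
      rcases List.mem_cons.1 hx with rfl | hxU
      · have heq : U.filter (fun v => !PySem.Set.contains (PySem.Set.add e x) v)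
            = U.filter (fun v => !PySem.Set.contains e v) := by
          apply List.filter_congr
          intro v hv
          have hvne : v ≠ x := fun hh => hune (hh ▸ hv)
          by_cases hve : v ∈ e
          · simp only [pvContains_true hve,
              pvContains_true ((PySem.Set.mem_add e x v).2 (Or.inl hve))]
          · have h1 : v ∉ PySem.Set.add e x := by
              intro hmem
              rcases (PySem.Set.mem_add e x v).1 hmem with hh | hh
              · exact hve hh
              · exact hvne hh
            simp only [pvContains_false hve, pvContains_false h1]
        rw [pvFilterNotMem ((PySem.Set.mem_add e x x).2 (Or.inr rfl)),
          pvFilterMem hxe, heq, List.length_cons]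
      · have hune2 : u ≠ x := fun hh => hune (hh ▸ hxU)
        have ih' := ih hnd hxU
        by_cases hue : u ∈ e
        · rw [pvFilterNotMem hue,
            pvFilterNotMem ((PySem.Set.mem_add e x u).2 (Or.inl hue))]
          exact ih'
        · have h1 : u ∉ PySem.Set.add e x := by
            intro hmem
            rcases (PySem.Set.mem_add e x u).1 hmem with hh | hh
            · exact hue hh
            · exact hune2 hh
          rw [pvFilterMem h1, pvFilterMem hue, List.length_cons, List.length_cons]
          omega

-- all the properties of one pass of A's inner for-loop
theorem pvStepA_spec (cs : List String) (e : PySem.Set String) (st : List String)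
    (U : List String) (hU : U.Nodup) (hcs : ∀ x ∈ cs, x ∈ U)
    (hnd : e.Nodup) :
    (pvStepA cs (e, st)).1.Nodup ∧
    (∀ x, x ∈ (pvStepA cs (e, st)).1 ↔ x ∈ e ∨ x ∈ cs) ∧
    (∀ x ∈ st, x ∈ (pvStepA cs (e, st)).2) ∧
    (∀ x ∈ (pvStepA cs (e, st)).2, x ∈ st ∨ x ∈ cs) ∧
    (∀ x ∈ (pvStepA cs (e, st)).1, x ∈ e ∨ x ∈ (pvStepA cs (e, st)).2) ∧
    2 * pvRem U (pvStepA cs (e, st)).1 + (pvStepA cs (e, st)).2.length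
      ≤ 2 * pvRem U e + st.length := by
  induction cs generalizing e st with
  | nil =>
      exact ⟨hnd, fun x => by simp [pvStepA], fun x hx => hx, fun x hx => Or.inl hx,
        fun x hx => Or.inl hx, le_refl _⟩
  | cons c cs ih =>
      have hcs' : ∀ x ∈ cs, x ∈ U := fun x hx => hcs x (List.mem_cons_of_mem _ hx)
      by_cases hc : c ∈ e
      · have hstep : pvStepA (c :: cs) (e, st) = pvStepA cs (e, st) := by
          unfold pvStepA
          simp [List.foldl_cons, hc]
        rw [hstep]
        obtain ⟨h1, h2, h3, h4, h5, h6⟩ := ih e st hcs' hnd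
        refine ⟨h1, fun x => ?_, h3, fun x hx => ?_, h5, h6⟩
        · rw [h2 x]
          constructor
          · rintro (h | h)
            · exact Or.inl h
            · exact Or.inr (List.mem_cons_of_mem _ h)
          · rintro (h | h)
            · exact Or.inl h
            · rcases List.mem_cons.1 h with rfl | h
              · exact Or.inl hc
              · exact Or.inr h
        · rcases h4 x hx with h | h
          · exact Or.inl h
          · exact Or.inr (List.mem_cons_of_mem _ h)
      · have hstep : pvStepA (c :: cs) (e, st)
            = pvStepA cs (PySem.Set.add e c, c :: st) := by
          unfold pvStepA
          simp [List.foldl_cons, hc]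
        rw [hstep]
        obtain ⟨h1, h2, h3, h4, h5, h6⟩ :=
          ih (PySem.Set.add e c) (c :: st) hcs' (PySem.Set.nodup_add e c hnd)
        refine ⟨h1, fun x => ?_, fun x hx => h3 x (List.mem_cons_of_mem _ hx),
          fun x hx => ?_, fun x hx => ?_, ?_⟩
        · rw [h2 x, PySem.Set.mem_add]
          constructor
          · rintro ((h | rfl) | h)
            · exact Or.inl h
            · exact Or.inr (List.mem_cons_self)
            · exact Or.inr (List.mem_cons_of_mem _ h)
          · rintro (h | h)
            · exact Or.inl (Or.inl h)
            · rcases List.mem_cons.1 h with rfl | h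
              · exact Or.inl (Or.inr rfl)
              · exact Or.inr h
        · rcases h4 x hx with h | h
          · rcases List.mem_cons.1 h with rfl | h
            · exact Or.inr List.mem_cons_self
            · exact Or.inl h
          · exact Or.inr (List.mem_cons_of_mem _ h)
        · rcases h5 x hx with h | h
          · rcases (PySem.Set.mem_add e c x).1 h with h | rfl
            · exact Or.inl h
            · exact Or.inr (h3 x List.mem_cons_self)
          · exact Or.inr h
        · have hrem : pvRem U (PySem.Set.add e c) + 1 = pvRem U e :=
            pvRem_add hU (hcs c List.mem_cons_self) hc
          calc 2 * pvRem U (pvStepA cs (PySem.Set.add e c, c :: st)).1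
                + (pvStepA cs (PySem.Set.add e c, c :: st)).2.length
              ≤ 2 * pvRem U (PySem.Set.add e c) + (c :: st).length := h6
            _ ≤ 2 * pvRem U e + st.length := by simp only [List.length_cons]; omega

-- A's whole while-loop computes exactly the reachable set
theorem pvLoopA_spec (dirty : List String) (dependents : List (String × List String))
    (fuel : Nat) (e : PySem.Set String) (st : List String)
    (hnd : e.Nodup)
    (hst : ∀ x ∈ st, x ∈ e)
    (hre : ∀ x ∈ e, pvReach dirty dependents x)
    (hd : ∀ x ∈ dirty, x ∈ e)
    (hcl : ∀ x ∈ e, x ∉ st → ∀ y ∈ pvChildren dependents x, y ∈ e)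
    (hfuel : 2 * pvRem (pvU dirty dependents) e + st.length ≤ fuel) :
    (pvLoopA dependents fuel e st).Nodup ∧
    ∀ x, (x ∈ pvLoopA dependents fuel e st ↔ pvReach dirty dependents x) := by
  induction fuel generalizing e st with
  | zero =>
      have hst0 : st = [] := List.length_eq_zero_iff.1 (by omega)
      subst hst0
      refine ⟨hnd, fun x => ⟨fun hx => hre x hx, fun hx => ?_⟩⟩
      induction hx with
      | base h => exact hd _ h
      | step hr hc ihx => exact hcl _ ihx (by simp) _ hc
  | succ fuel ih =>
      cases st with
      | nil =>
          refine ⟨hnd, fun x => ⟨fun hx => hre x hx, fun hx => ?_⟩⟩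
          induction hx with
          | base h => exact hd _ h
          | step hr hc ihx => exact hcl _ ihx (by simp) _ hc
      | cons node rest =>
          have hnode : node ∈ e := hst node List.mem_cons_self
          obtain ⟨h1, h2, h3, h4, h5, h6⟩ :=
            pvStepA_spec (pvChildren dependents node) e rest (pvU dirty dependents)
              (PySem.Set.nodup_ofList _) (fun x hx => pvChildren_mem_U hx) hnd
          show (pvLoopA dependents fuel _ _).Nodup ∧ _
          apply ih
          · exact h1
          · intro x hx
            rcases h4 x hx with h | h
            · exact (h2 x).2 (Or.inl (hst x (List.mem_cons_of_mem _ h)))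
            · exact (h2 x).2 (Or.inr h)
          · intro x hx
            rcases (h2 x).1 hx with h | h
            · exact hre x h
            · exact pvReach.step (hre node hnode) h
          · intro x hx
            exact (h2 x).2 (Or.inl (hd x hx))
          · intro x hx hnotin y hy
            rcases h5 x hx with hxe | hxs
            · by_cases hxn : x = node
              · subst hxn
                exact (h2 y).2 (Or.inr hy)
              · have hxrest : x ∉ rest := fun h => hnotin (h3 x h)
                have hxst : x ∉ node :: rest := by
                  intro h; rcases List.mem_cons.1 h with h | h
                  · exact hxn h
                  · exact hxrest h
                exact (h2 y).2 (Or.inl (hcl x hxe hxst y hy))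
            · exact absurd hxs hnotin
          · simp only [List.length_cons] at hfuel
            omega

-- membership in B's per-level union of dependents
theorem pvFoldB_spec (dependents : List (String × List String))
    (fr : List String) (acc : PySem.Set String) (hacc : acc.Nodup) :
    (fr.foldl (fun acc node => PySem.Set.union acc (pvChildren dependents node)) acc).Nodup ∧
    ∀ x, (x ∈ fr.foldl (fun acc node => PySem.Set.union acc (pvChildren dependents node)) acc
      ↔ x ∈ acc ∨ ∃ n ∈ fr, x ∈ pvChildren dependents n) := by
  induction fr generalizing acc with
  | nil => exact ⟨hacc, by simp⟩
  | cons n fr ih =>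
      simp only [List.foldl_cons]
      obtain ⟨h1, h2⟩ := ih (PySem.Set.union acc (pvChildren dependents n))
        (PySem.Set.nodup_union _ _ hacc)
      refine ⟨h1, fun x => ?_⟩
      rw [h2 x, PySem.Set.mem_union]
      constructor
      · rintro ((h | h) | ⟨m, hm, hx⟩)
        · exact Or.inl h
        · exact Or.inr ⟨n, List.mem_cons_self, h⟩
        · exact Or.inr ⟨m, List.mem_cons_of_mem _ hm, hx⟩
      · rintro (h | ⟨m, hm, hx⟩)
        · exact Or.inl (Or.inl h)
        · rcases List.mem_cons.1 hm with rfl | hm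
          · exact Or.inl (Or.inr hx)
          · exact Or.inr ⟨m, hm, hx⟩

-- B's whole while-loop computes exactly the reachable set
theorem pvLoopB_spec (dirty : List String) (dependents : List (String × List String))
    (fuel : Nat) (e fr : PySem.Set String)
    (hnd : e.Nodup)
    (hfr : ∀ x ∈ fr, x ∈ e)
    (hre : ∀ x ∈ e, pvReach dirty dependents x)
    (hd : ∀ x ∈ dirty, x ∈ e)
    (hcl : ∀ x ∈ e, x ∉ fr → ∀ y ∈ pvChildren dependents x, y ∈ e)
    (hfuel : pvRem (pvU dirty dependents) e + 2 ≤ fuel) :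
    (pvLoopB dependents fuel e fr).Nodup ∧
    ∀ x, (x ∈ pvLoopB dependents fuel e fr ↔ pvReach dirty dependents x) := by
  induction fuel generalizing e fr with
  | zero => omega
  | succ fuel ih =>
      cases fr with
      | nil =>
          refine ⟨hnd, fun x => ⟨fun hx => hre x hx, fun hx => ?_⟩⟩
          induction hx with
          | base h => exact hd _ h
          | step hr hc ihx => exact hcl _ ihx (by simp) _ hc
      | cons n0 fr0 =>
          obtain ⟨hf1, hf2⟩ := pvFoldB_spec dependents (n0 :: fr0) PySem.Set.empty
            (by simp [PySem.Set.empty])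
          set nxt0 := (n0 :: fr0).foldl
            (fun acc node => PySem.Set.union acc (pvChildren dependents node))
            PySem.Set.empty with hnxt0
          have hmem0 : ∀ x, x ∈ nxt0 ↔ ∃ n ∈ n0 :: fr0, x ∈ pvChildren dependents n := by
            intro x; rw [hf2 x]; simp [PySem.Set.empty]
          set nxt := PySem.Set.diff nxt0 e with hnxt
          have hmem : ∀ x, x ∈ nxt ↔ (∃ n ∈ n0 :: fr0, x ∈ pvChildren dependents n) ∧ x ∉ e := by
            intro x; rw [hnxt, PySem.Set.mem_diff, hmem0]
          have hstep : pvLoopB dependents (fuel + 1) e (n0 :: fr0)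
              = pvLoopB dependents fuel (PySem.Set.union e nxt) nxt := rfl
          rw [hstep]
          cases hcase : nxt with
          | nil =>
              -- no new node: the next iteration sees an empty frontier and stops; and the
              -- current set is already closed
              have hclosed : ∀ x ∈ e, ∀ y ∈ pvChildren dependents x, y ∈ e := by
                intro x hx y hy
                by_cases hxf : x ∈ n0 :: fr0
                · by_contra hye
                  have hmemy : y ∈ nxt := (hmem y).2 ⟨⟨x, hxf, hy⟩, hye⟩
                  rw [hcase] at hmemy; cases hmemy
                · exact hcl x hx hxf y hy
              have hunion : PySem.Set.union e ([] : List String) = e := rfl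
              have hloop : pvLoopB dependents fuel e [] = e := by cases fuel <;> rfl
              rw [hunion, hloop]
              refine ⟨hnd, fun x => ⟨fun hx => hre x hx, fun hx => ?_⟩⟩
              induction hx with
              | base h => exact hd _ h
              | step hr hc ihx => exact hclosed _ ihx _ hc
          | cons y0 ytl =>
              -- at least one new node: the measure drops
              rw [← hcase]
              have hy0 : y0 ∈ nxt := by rw [hcase]; exact List.mem_cons_self
              have hy0U : y0 ∈ pvU dirty dependents := by
                obtain ⟨⟨m, _, hc⟩, _⟩ := (hmem y0).1 hy0
                exact pvChildren_mem_U hc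
              have hy0e : y0 ∉ e := ((hmem y0).1 hy0).2
              apply ih
              · exact PySem.Set.nodup_union _ _ hnd
              · intro x hx
                exact (PySem.Set.mem_union _ _ x).2 (Or.inr hx)
              · intro x hx
                rcases (PySem.Set.mem_union _ _ x).1 hx with h | h
                · exact hre x h
                · obtain ⟨⟨m, hmfr, hc⟩, _⟩ := (hmem x).1 h
                  exact pvReach.step (hre m (hfr m hmfr)) hc
              · intro x hx
                exact (PySem.Set.mem_union _ _ x).2 (Or.inl (hd x hx))
              · intro x hx hnotin y hy
                rcases (PySem.Set.mem_union _ _ x).1 hx with hxe | hxn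
                · by_cases hxf : x ∈ n0 :: fr0
                  · apply (PySem.Set.mem_union _ _ y).2
                    by_cases hye : y ∈ e
                    · exact Or.inl hye
                    · exact Or.inr ((hmem y).2 ⟨⟨x, hxf, hy⟩, hye⟩)
                  · exact (PySem.Set.mem_union _ _ y).2 (Or.inl (hcl x hxe hxf y hy))
                · exact absurd hxn hnotin
              · have h1 : pvRem (pvU dirty dependents) (PySem.Set.union e nxt)
                    ≤ pvRem (pvU dirty dependents) (PySem.Set.add e y0) := by
                  apply pvRem_mono
                  intro u hu
                  rcases (PySem.Set.mem_add e y0 u).1 hu with h | rfl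
                  · exact (PySem.Set.mem_union _ _ u).2 (Or.inl h)
                  · exact (PySem.Set.mem_union _ _ u).2 (Or.inr hy0)
                have h2 : pvRem (pvU dirty dependents) (PySem.Set.add e y0) + 1
                    = pvRem (pvU dirty dependents) e :=
                  pvRem_add (PySem.Set.nodup_ofList _) hy0U hy0e
                omega

-- lengths of the universe against the fuel expressions in the ports
theorem pvU_length_le (dirty : List String) (dependents : List (String × List String)) :
    (pvU dirty dependents).length
      ≤ dirty.length + (dependents.flatMap (fun p => p.2)).length := by
  have := PySem.Set.length_ofList_le (dirty ++ dependents.flatMap (fun p => p.2))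
  simpa using this

-- ===== VERDICT (by name: the statement is the Claim_ definition above) =====
theorem expand_dirty_ids_spec : Claim_equal_expand_dirty_ids := by
  intro dirty dependents _
  unfold Spec_expand_dirty_ids expand_dirty_ids expand_dirty_ids_alt
  have hUle := pvU_length_le dirty dependents
  have hremA := pvRem_le (pvU dirty dependents) (PySem.Set.ofList dirty)
  obtain ⟨hA1, hA2⟩ := pvLoopA_spec dirty dependents
      (2 * (dirty.length + (dependents.flatMap (fun p => p.2)).length) + dirty.length + 1)
      (PySem.Set.ofList dirty) dirty.reverse
      (PySem.Set.nodup_ofList _)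
      (fun x hx => (PySem.Set.mem_ofList _ _).2 (List.mem_reverse.1 hx))
      (fun x hx => pvReach.base ((PySem.Set.mem_ofList _ _).1 hx))
      (fun x hx => (PySem.Set.mem_ofList _ _).2 hx)
      (fun x hx hnotin => absurd (List.mem_reverse.2 ((PySem.Set.mem_ofList _ _).1 hx)) hnotin)
      (by simp only [List.length_reverse]; omega)
  obtain ⟨hB1, hB2⟩ := pvLoopB_spec dirty dependents
      (dirty.length + (dependents.flatMap (fun p => p.2)).length + 2)
      (PySem.Set.ofList dirty) (PySem.Set.ofList dirty)
      (PySem.Set.nodup_ofList _)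
      (fun x hx => hx)
      (fun x hx => pvReach.base ((PySem.Set.mem_ofList _ _).1 hx))
      (fun x hx => (PySem.Set.mem_ofList _ _).2 hx)
      (fun x hx hnotin => absurd hx hnotin)
      (by omega)
  apply PySem.List.sorted_eq_sorted_of_perm _ _ _ (fun a b h => h)
  exact (List.perm_ext_iff_of_nodup hA1 hB1).2 (fun x => (hA2 x).trans (hB2 x).symm)
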